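-- pv_equiv track=rewrite | github.com/peppy0510/OpenAISublimeText | plugins/function_handler.py | _parse_simple_patch
-- ===== SOURCE A (Python) =====
-- from typing import Dict, List, Tuple
--
-- def _parse_simple_patch(diff: str) -> List[Tuple[str, str]]:
--     """Very loose parser kept as fallback for older patches."""
--
--     lines = diff.splitlines()
--     i = 0
--     hunks: List[Tuple[str, str]] = []
--
--     while i < len(lines):
--         if lines[i].startswith('-') and not lines[i].startswith('---'):
--             old_block_lines: List[str] = []
--             while i < len(lines) and lines[i].startswith('-') and not lines[i].startswith('---'):
--                 old_block_lines.append(lines[i][1:])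
--                 i += 1
--
--             new_block_lines: List[str] = []
--             while i < len(lines) and lines[i].startswith('+') and not lines[i].startswith('+++'):
--                 new_block_lines.append(lines[i][1:])
--                 i += 1
--
--             old_text = '\n'.join(old_block_lines) + '\n'
--             new_text = ('\n'.join(new_block_lines) + '\n') if new_block_lines else ''
--             hunks.append((old_text, new_text))
--         else:
--             i += 1
--
--     return hunks
-- ===== SOURCE B (Python) =====
-- from typing import List, Tuple
--
--
-- def _parse_simple_patch(diff: str) -> List[Tuple[str, str]]:
--     """Single-pass state machine: 0 = idle, 1 = collecting old lines, 2 = collecting new lines."""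
--     hunks: List[Tuple[str, str]] = []
--     mode = 0
--     olds: List[str] = []
--     news: List[str] = []
--
--     def _flush(o: List[str], n: List[str]) -> Tuple[str, str]:
--         return ('\n'.join(o) + '\n', ('\n'.join(n) + '\n') if n else '')
--
--     for line in diff.splitlines():
--         if line.startswith('-') and not line.startswith('---'):
--             if mode == 2:
--                 hunks.append(_flush(olds, news))
--                 olds, news = [], []
--             olds.append(line[1:])
--             mode = 1
--         elif line.startswith('+') and not line.startswith('+++'):
--             if mode != 0:
--                 news.append(line[1:])
--                 mode = 2
--         else:
--             if mode != 0:
--                 hunks.append(_flush(olds, news))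
--                 olds, news = [], []
--             mode = 0
--
--     if mode != 0:
--         hunks.append(_flush(olds, news))
--     return hunks
-- ===== Notes on version B (the rewrite author's own statement) =====
-- stated objective: alternative
-- what changed: Replaced the index-based outer while with two nested inner while-loops by a single linear pass: a three-state machine (idle / collecting old / collecting new) over the lines that flushes a hunk on each state exit.
import Mathlib
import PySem

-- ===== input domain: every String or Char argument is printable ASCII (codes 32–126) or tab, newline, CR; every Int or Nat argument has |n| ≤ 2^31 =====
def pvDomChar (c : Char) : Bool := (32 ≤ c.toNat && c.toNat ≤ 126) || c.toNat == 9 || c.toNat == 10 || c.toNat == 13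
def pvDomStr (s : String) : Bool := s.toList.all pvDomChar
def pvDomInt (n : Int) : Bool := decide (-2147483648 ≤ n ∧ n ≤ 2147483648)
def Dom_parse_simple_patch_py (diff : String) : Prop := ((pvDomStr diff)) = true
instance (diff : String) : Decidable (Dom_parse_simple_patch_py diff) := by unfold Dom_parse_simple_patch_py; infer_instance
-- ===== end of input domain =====

-- B replaces A's index-based nested while-loops by a single-pass three-state machine over the lines (alternative decomposition, same cost). Return value only; neither mutates its argument.


-- ===== PORT A =====
-- shared classifiers: both Python sources contain exactly these startswith tests and line[1:]
def pvIsMinus (l : String) : Bool := PySem.Str.startswith l "-" && !(PySem.Str.startswith l "---")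
def pvIsPlus (l : String) : Bool := PySem.Str.startswith l "+" && !(PySem.Str.startswith l "+++")
def pvStrip1 (l : String) : String := PySem.Str.slice l (some 1) none   -- line[1:]

-- inner 'while … startswith("-")' of A: collects the stripped block and returns the rest
def pvAOldLoop : List String → List String × List String
  | [] => ([], [])
  | l :: ls =>
    if pvIsMinus l then
      let p := pvAOldLoop ls
      (pvStrip1 l :: p.1, p.2)
    else ([], l :: ls)

-- inner 'while … startswith("+")' of A
def pvANewLoop : List String → List String × List String
  | [] => ([], [])
  | l :: ls =>
    if pvIsPlus l then
      let p := pvANewLoop ls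
      (pvStrip1 l :: p.1, p.2)
    else ([], l :: ls)

-- outer 'while i < len(lines)' of A; fuel = remaining line count, a pure totality guard
-- (each iteration consumes at least one line, so fuel lines.length never runs out)
def pvALoopF : Nat → List String → List (String × String)
  | 0, _ => []
  | _ + 1, [] => []
  | fuel + 1, l :: ls =>
    if pvIsMinus l then
      let p := pvAOldLoop (l :: ls)
      let q := pvANewLoop p.2
      (PySem.Str.join "\n" p.1 ++ "\n",
       if q.1.isEmpty then "" else PySem.Str.join "\n" q.1 ++ "\n") :: pvALoopF fuel q.2
    else pvALoopF fuel ls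

def pvALoop (lines : List String) : List (String × String) := pvALoopF lines.length lines

def parse_simple_patch_py (diff : String) : List (String × String) :=
  pvALoop (PySem.Str.splitlines diff)

-- ===== PORT B =====
def pvBFlush (o n : List String) : String × String :=
  (PySem.Str.join "\n" o ++ "\n", if n.isEmpty then "" else PySem.Str.join "\n" n ++ "\n")

-- state = (hunks, mode, olds, news); mode 0 idle, 1 collecting old, 2 collecting new
def pvBStep (st : List (String × String) × Nat × List String × List String) (line : String) :
    List (String × String) × Nat × List String × List String :=
  let (hunks, mode, olds, news) := st
  if pvIsMinus line then
    if mode == 2 then (hunks ++ [pvBFlush olds news], 1, [pvStrip1 line], [])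
    else (hunks, 1, olds ++ [pvStrip1 line], news)
  else if pvIsPlus line then
    if mode != 0 then (hunks, 2, olds, news ++ [pvStrip1 line])
    else (hunks, mode, olds, news)
  else
    if mode != 0 then (hunks ++ [pvBFlush olds news], 0, [], [])
    else (hunks, mode, olds, news)

def parse_simple_patch_py_alt (diff : String) : List (String × String) :=
  let st := (PySem.Str.splitlines diff).foldl pvBStep ([], 0, [], [])
  if st.2.1 != 0 then st.1 ++ [pvBFlush st.2.2.1 st.2.2.2] else st.1

-- ===== PRECONDITION & SPEC =====
def Spec_parse_simple_patch_py (diff : String) (out : List (String × String)) : Prop := out = parse_simple_patch_py_alt diff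
instance (diff : String) (out : List (String × String)) : Decidable (Spec_parse_simple_patch_py diff out) := by unfold Spec_parse_simple_patch_py; infer_instance

-- ===== CLAIM (what is proved, stated in full; the proofs are below) =====
def Claim_equal_parse_simple_patch_py : Prop := ∀ (diff : String), Dom_parse_simple_patch_py diff → Spec_parse_simple_patch_py diff (parse_simple_patch_py diff)

-- ===== LEMMAS AND PROOFS =====

theorem pvAOldLoop_snd_le (ls : List String) : (pvAOldLoop ls).2.length ≤ ls.length := by
  induction ls with
  | nil => simp [pvAOldLoop]
  | cons l ls ih => by_cases h : pvIsMinus l = true <;> simp [pvAOldLoop, h] <;> omega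

theorem pvANewLoop_snd_le (ls : List String) : (pvANewLoop ls).2.length ≤ ls.length := by
  induction ls with
  | nil => simp [pvANewLoop]
  | cons l ls ih => by_cases h : pvIsPlus l = true <;> simp [pvANewLoop, h] <;> omega

-- the fuelled loop does not depend on the fuel once the fuel covers the line count
theorem pvALoopF_congr : ∀ (f1 : Nat) (lines : List String) (f2 : Nat),
    lines.length ≤ f1 → lines.length ≤ f2 → pvALoopF f1 lines = pvALoopF f2 lines := by
  intro f1
  induction f1 with
  | zero =>
    intro lines f2 h1 _
    have hnil : lines = [] := List.eq_nil_of_length_eq_zero (Nat.le_zero.mp h1)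
    subst hnil
    cases f2 <;> rfl
  | succ g ih =>
    intro lines f2 h1 h2
    cases lines with
    | nil => cases f2 <;> rfl
    | cons l ls =>
      obtain ⟨g2, rfl⟩ : ∃ g2, f2 = g2 + 1 :=
        ⟨f2 - 1, by simp at h2; omega⟩
      simp only [List.length_cons] at h1 h2
      simp only [pvALoopF]
      by_cases hm : pvIsMinus l = true
      · rw [if_pos hm, if_pos hm]
        have hq : (pvANewLoop (pvAOldLoop (l :: ls)).2).2.length ≤ ls.length := by
          have ho : (pvAOldLoop (l :: ls)).2.length ≤ ls.length := by
            simp only [pvAOldLoop, hm, if_true]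
            exact pvAOldLoop_snd_le ls
          exact le_trans (pvANewLoop_snd_le _) ho
        exact congrArg _ (ih _ g2 (by omega) (by omega))
      · rw [if_neg hm, if_neg hm]
        exact ih ls g2 (by omega) (by omega)

theorem pvIsPlus_of_isMinus {l : String} (h : pvIsMinus l = true) : pvIsPlus l = false := by
  simp only [pvIsMinus, Bool.and_eq_true, PySem.Str.startswith_eq] at h
  obtain ⟨t, ht⟩ := (PySem.Chars.startswith_iff _ _).mp h.1
  simp only [pvIsPlus, PySem.Str.startswith_eq, Bool.and_eq_false_iff]
  left
  by_cases hpb : PySem.Chars.startswith l.toList "+".toList = true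
  · exfalso
    obtain ⟨t2, ht2⟩ := (PySem.Chars.startswith_iff _ _).mp hpb
    have hcontr := ht.trans ht2.symm
    rw [show "-".toList = ['-'] from rfl, show "+".toList = ['+'] from rfl] at hcontr
    simp at hcontr
  · simpa using hpb

theorem pvIsMinus_of_isPlus {l : String} (h : pvIsPlus l = true) : pvIsMinus l = false := by
  by_cases h' : pvIsMinus l = true
  · exact absurd h (by simp [pvIsPlus_of_isMinus h'])
  · simpa using h'

-- closed forms of A's inner loops
theorem pvAOldLoop_eq (ls : List String) :
    pvAOldLoop ls = ((ls.takeWhile pvIsMinus).map pvStrip1, ls.dropWhile pvIsMinus) := by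
  induction ls with
  | nil => simp [pvAOldLoop]
  | cons l ls ih => by_cases h : pvIsMinus l = true <;> simp [pvAOldLoop, h, ih]

theorem pvANewLoop_eq (ls : List String) :
    pvANewLoop ls = ((ls.takeWhile pvIsPlus).map pvStrip1, ls.dropWhile pvIsPlus) := by
  induction ls with
  | nil => simp [pvANewLoop]
  | cons l ls ih => by_cases h : pvIsPlus l = true <;> simp [pvANewLoop, h, ih]

-- A's value after the state machine already collected 'olds' (mode 1)
def pvContOld (olds : List String) (lines : List String) : List (String × String) :=
  let r1 := lines.dropWhile pvIsMinus
  pvBFlush (olds ++ (lines.takeWhile pvIsMinus).map pvStrip1)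
           ((r1.takeWhile pvIsPlus).map pvStrip1) :: pvALoop (r1.dropWhile pvIsPlus)

-- A's value after the machine collected 'olds' and a nonempty 'news' (mode 2)
def pvContNew (olds news : List String) (lines : List String) : List (String × String) :=
  pvBFlush olds (news ++ (lines.takeWhile pvIsPlus).map pvStrip1) ::
    pvALoop (lines.dropWhile pvIsPlus)

theorem pvALoop_cons_minus {l : String} (ls : List String) (h : pvIsMinus l = true) :
    pvALoop (l :: ls) = pvContOld [pvStrip1 l] ls := by
  have hq : (pvANewLoop (pvAOldLoop (l :: ls)).2).2.length ≤ ls.length := by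
    have ho : (pvAOldLoop (l :: ls)).2.length ≤ ls.length := by
      simp only [pvAOldLoop, h, if_true]
      exact pvAOldLoop_snd_le ls
    exact le_trans (pvANewLoop_snd_le _) ho
  unfold pvALoop
  simp only [List.length_cons, pvALoopF, h, if_true]
  rw [pvALoopF_congr ls.length _ _ hq (le_refl _)]
  simp [h, pvAOldLoop_eq, pvANewLoop_eq, pvContOld, pvBFlush, pvALoop]

theorem pvALoop_cons_not_minus {l : String} (ls : List String) (h : pvIsMinus l = false) :
    pvALoop (l :: ls) = pvALoop ls := by
  unfold pvALoop
  simp only [List.length_cons, pvALoopF]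
  simp [h]

-- one-line transition equations for the 'rest of A' continuations
theorem pvContOld_cons_minus {l : String} (olds ls : List String) (h : pvIsMinus l = true) :
    pvContOld olds (l :: ls) = pvContOld (olds ++ [pvStrip1 l]) ls := by
  simp [pvContOld, h]

theorem pvContOld_cons_plus {l : String} (olds ls : List String) (h : pvIsPlus l = true) :
    pvContOld olds (l :: ls) = pvContNew olds [pvStrip1 l] ls := by
  simp [pvContOld, pvContNew, h, pvIsMinus_of_isPlus h]

theorem pvContOld_cons_other {l : String} (olds ls : List String)
    (hm : pvIsMinus l = false) (hp : pvIsPlus l = false) :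
    pvContOld olds (l :: ls) = pvBFlush olds [] :: pvALoop ls := by
  simp [pvContOld, hm, hp, pvALoop_cons_not_minus ls hm]

theorem pvContNew_cons_minus {l : String} (olds news ls : List String) (h : pvIsMinus l = true) :
    pvContNew olds news (l :: ls) = pvBFlush olds news :: pvContOld [pvStrip1 l] ls := by
  simp [pvContNew, pvIsPlus_of_isMinus h, pvALoop_cons_minus ls h]

theorem pvContNew_cons_plus {l : String} (olds news ls : List String) (h : pvIsPlus l = true) :
    pvContNew olds news (l :: ls) = pvContNew olds (news ++ [pvStrip1 l]) ls := by
  simp [pvContNew, h]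

theorem pvContNew_cons_other {l : String} (olds news ls : List String)
    (hm : pvIsMinus l = false) (hp : pvIsPlus l = false) :
    pvContNew olds news (l :: ls) = pvBFlush olds news :: pvALoop ls := by
  simp [pvContNew, hp, pvALoop_cons_not_minus ls hm]

def pvFinalize (st : List (String × String) × Nat × List String × List String) :
    List (String × String) :=
  if st.2.1 != 0 then st.1 ++ [pvBFlush st.2.2.1 st.2.2.2] else st.1

def pvExpect (mode : Nat) (olds news : List String) (lines : List String) :
    List (String × String) :=
  if mode == 0 then pvALoop lines
  else if mode == 1 then pvContOld olds lines
  else pvContNew olds news lines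

-- the state-machine invariant, and the heart of the proof: running B's fold from any
-- reachable state appends exactly what A would still produce
theorem pvKey (lines : List String) : ∀ (hunks : List (String × String))
    (mode : Nat) (olds news : List String),
    (mode = 0 ∧ olds = [] ∧ news = []) ∨ (mode = 1 ∧ news = []) ∨ (mode = 2 ∧ news ≠ []) →
    pvFinalize (lines.foldl pvBStep (hunks, mode, olds, news)) =
      hunks ++ pvExpect mode olds news lines := by
  induction lines with
  | nil =>
    intro hunks mode olds news hinv
    rcases hinv with ⟨h0, ho, hn⟩ | ⟨h1, hn⟩ | ⟨h2, hn⟩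
    · simp [pvFinalize, pvExpect, h0, pvALoop, pvALoopF]
    · simp [pvFinalize, pvExpect, h1, pvContOld, pvALoop, pvALoopF, hn]
    · simp [pvFinalize, pvExpect, h2, pvContNew, pvALoop, pvALoopF]
  | cons l ls ih =>
    intro hunks mode olds news hinv
    rw [List.foldl_cons]
    by_cases hm : pvIsMinus l = true
    · have hp := pvIsPlus_of_isMinus hm
      rcases hinv with ⟨h0, ho, hn⟩ | ⟨h1, hn⟩ | ⟨h2, hn⟩
      · subst h0 ho hn
        have hstep : pvBStep (hunks, 0, [], []) l = (hunks, 1, [pvStrip1 l], []) := by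
          simp [pvBStep, hm]
        rw [hstep, ih hunks 1 [pvStrip1 l] [] (Or.inr (Or.inl ⟨rfl, rfl⟩))]
        simp [pvExpect, pvALoop_cons_minus ls hm]
      · subst h1 hn
        have hstep : pvBStep (hunks, 1, olds, []) l = (hunks, 1, olds ++ [pvStrip1 l], []) := by
          simp [pvBStep, hm]
        rw [hstep, ih hunks 1 (olds ++ [pvStrip1 l]) [] (Or.inr (Or.inl ⟨rfl, rfl⟩))]
        simp [pvExpect, pvContOld_cons_minus olds ls hm]
      · subst h2
        have hstep : pvBStep (hunks, 2, olds, news) l =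
            (hunks ++ [pvBFlush olds news], 1, [pvStrip1 l], []) := by
          simp [pvBStep, hm]
        rw [hstep, ih (hunks ++ [pvBFlush olds news]) 1 [pvStrip1 l] []
              (Or.inr (Or.inl ⟨rfl, rfl⟩))]
        simp [pvExpect, pvContNew_cons_minus olds news ls hm]
    · replace hm : pvIsMinus l = false := by simpa using hm
      by_cases hp : pvIsPlus l = true
      · rcases hinv with ⟨h0, ho, hn⟩ | ⟨h1, hn⟩ | ⟨h2, hn⟩
        · subst h0 ho hn
          have hstep : pvBStep (hunks, 0, [], []) l = (hunks, 0, [], []) := by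
            simp [pvBStep, hm, hp]
          rw [hstep, ih hunks 0 [] [] (Or.inl ⟨rfl, rfl, rfl⟩)]
          simp [pvExpect, pvALoop_cons_not_minus ls hm]
        · subst h1 hn
          have hstep : pvBStep (hunks, 1, olds, []) l = (hunks, 2, olds, [pvStrip1 l]) := by
            simp [pvBStep, hm, hp]
          rw [hstep, ih hunks 2 olds [pvStrip1 l] (Or.inr (Or.inr ⟨rfl, by simp⟩))]
          simp [pvExpect, pvContOld_cons_plus olds ls hp]
        · subst h2
          have hstep : pvBStep (hunks, 2, olds, news) l =
              (hunks, 2, olds, news ++ [pvStrip1 l]) := by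
            simp [pvBStep, hm, hp]
          rw [hstep, ih hunks 2 olds (news ++ [pvStrip1 l]) (Or.inr (Or.inr ⟨rfl, by simp⟩))]
          simp [pvExpect, pvContNew_cons_plus olds news ls hp]
      · replace hp : pvIsPlus l = false := by simpa using hp
        rcases hinv with ⟨h0, ho, hn⟩ | ⟨h1, hn⟩ | ⟨h2, hn⟩
        · subst h0 ho hn
          have hstep : pvBStep (hunks, 0, [], []) l = (hunks, 0, [], []) := by
            simp [pvBStep, hm, hp]
          rw [hstep, ih hunks 0 [] [] (Or.inl ⟨rfl, rfl, rfl⟩)]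
          simp [pvExpect, pvALoop_cons_not_minus ls hm]
        · subst h1 hn
          have hstep : pvBStep (hunks, 1, olds, []) l =
              (hunks ++ [pvBFlush olds []], 0, [], []) := by
            simp [pvBStep, hm, hp]
          rw [hstep, ih (hunks ++ [pvBFlush olds []]) 0 [] [] (Or.inl ⟨rfl, rfl, rfl⟩)]
          simp [pvExpect, pvContOld_cons_other olds ls hm hp]
        · subst h2
          have hstep : pvBStep (hunks, 2, olds, news) l =
              (hunks ++ [pvBFlush olds news], 0, [], []) := by
            simp [pvBStep, hm, hp]
          rw [hstep, ih (hunks ++ [pvBFlush olds news]) 0 [] [] (Or.inl ⟨rfl, rfl, rfl⟩)]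
          simp [pvExpect, pvContNew_cons_other olds news ls hm hp]

-- ===== VERDICT (by name: the statement is the Claim_ definition above) =====
theorem parse_simple_patch_py_spec : Claim_equal_parse_simple_patch_py := by
  intro diff _
  unfold Spec_parse_simple_patch_py parse_simple_patch_py parse_simple_patch_py_alt
  have := pvKey (PySem.Str.splitlines diff) [] 0 [] [] (Or.inl ⟨rfl, rfl, rfl⟩)
  simpa [pvFinalize, pvExpect] using this.symm
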